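-- pv_equiv track=rewrite | github.com/tectonasinfo/late-attendance-tracker | late_attendance.py | calculate_fine
-- ===== SOURCE A (Python) =====
-- def calculate_fine(late_count: int) -> int:
--     """
--     Cumulative fine across all late days:
--     - Day 1–3  : ₹0 each   (grace period)
--     - Day 4–6  : ₹50 each
--     - Day 7–9  : ₹100 each
--     - Day 10–12: ₹150 each
--     - ... +₹50 per slab of 3
--     """
--     total = 0
--     for day in range(1, late_count + 1):
--         if day <= 3:
--             total += 0
--         else:
--             # Which slab after grace? slab 1 = days 4-6, slab 2 = days 7-9, ...
--             slab = (day - 4) // 3 + 1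
--             total += slab * 50
--     return total
-- ===== SOURCE B (Python) =====
-- def calculate_fine(late_count: int) -> int:
--     # Closed form: days past the 3-day grace fall into slabs of 3 costing 50*slab each.
--     # q full slabs contribute 50*3*(1+...+q) = 75*q*(q+1); the r leftover days are in slab q+1.
--     m = max(late_count - 3, 0)
--     q, r = divmod(m, 3)
--     return 75 * q * (q + 1) + 50 * r * (q + 1)
-- ===== Notes on version B (the rewrite author's own statement) =====
-- stated objective: faster
-- what changed: Replaced the day-by-day loop with a closed-form arithmetic-series sum over complete slabs of 3 plus the partial slab.
import Mathlib
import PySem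

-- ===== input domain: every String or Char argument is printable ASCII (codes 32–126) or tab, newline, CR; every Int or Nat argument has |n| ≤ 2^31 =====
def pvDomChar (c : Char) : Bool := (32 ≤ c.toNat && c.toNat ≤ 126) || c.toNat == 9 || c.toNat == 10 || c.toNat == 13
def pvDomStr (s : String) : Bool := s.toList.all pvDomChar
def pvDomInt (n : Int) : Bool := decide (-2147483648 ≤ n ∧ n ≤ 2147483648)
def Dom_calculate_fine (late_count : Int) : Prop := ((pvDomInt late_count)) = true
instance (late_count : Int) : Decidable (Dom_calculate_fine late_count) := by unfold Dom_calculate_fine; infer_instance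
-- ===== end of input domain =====

-- B replaces A's per-day loop with a closed-form arithmetic sum over slabs of 3; objective: faster.


-- ===== PORT A =====
def calculate_fine (late_count : Int) : Int :=
  (PySem.List.pyRange 1 (late_count + 1) 1).foldl
    (fun total day =>
      if day ≤ 3 then total + 0
      else total + (PySem.Int.floordiv (day - 4) 3 + 1) * 50) 0

-- ===== PORT B =====
def calculate_fine_alt (late_count : Int) : Int :=
  let m := max (late_count - 3) 0
  let q := PySem.Int.floordiv m 3
  let r := PySem.Int.mod m 3
  75 * q * (q + 1) + 50 * r * (q + 1)

-- ===== PRECONDITION & SPEC =====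
def Spec_calculate_fine (late_count : Int) (out : Int) : Prop := out = calculate_fine_alt late_count
instance (late_count : Int) (out : Int) : Decidable (Spec_calculate_fine late_count out) := by unfold Spec_calculate_fine; infer_instance

-- ===== CLAIM (what is proved, stated in full; the proofs are below) =====
def Claim_equal_calculate_fine : Prop := ∀ (late_count : Int), Dom_calculate_fine late_count → Spec_calculate_fine late_count (calculate_fine late_count)

-- ===== LEMMAS AND PROOFS =====

-- B's value written with Int.ediv/emod (valid since both divisors are positive).
theorem alt_eq_ediv (n : Int) :
    calculate_fine_alt n =
      75 * (max (n - 3) 0 / 3) * (max (n - 3) 0 / 3 + 1)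
        + 50 * (max (n - 3) 0 % 3) * (max (n - 3) 0 / 3 + 1) := by
  unfold calculate_fine_alt
  simp only [PySem.Int.floordiv_eq_ediv_of_pos (show (0:Int) < 3 by norm_num),
             PySem.Int.mod_eq_emod_of_pos (show (0:Int) < 3 by norm_num)]

-- One more late day past the grace period adds exactly the fine of the current slab.
theorem closed_form_step (x : Int) :
    75 * ((x + 1) / 3) * ((x + 1) / 3 + 1) + 50 * ((x + 1) % 3) * ((x + 1) / 3 + 1)
      = 75 * (x / 3) * (x / 3 + 1) + 50 * (x % 3) * (x / 3 + 1) + (x / 3 + 1) * 50 := by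
  rcases (by omega : x % 3 = 0 ∨ x % 3 = 1 ∨ x % 3 = 2) with h | h | h
  · have h1 : (x + 1) / 3 = x / 3 := by omega
    have h2 : (x + 1) % 3 = 1 := by omega
    rw [h1, h2, h]; ring
  · have h1 : (x + 1) / 3 = x / 3 := by omega
    have h2 : (x + 1) % 3 = 2 := by omega
    rw [h1, h2, h]; ring
  · have h1 : (x + 1) / 3 = x / 3 + 1 := by omega
    have h2 : (x + 1) % 3 = 0 := by omega
    rw [h1, h2, h]; ring

theorem fine_nat (k : Nat) : calculate_fine (k : Int) = calculate_fine_alt (k : Int) := by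
  induction k with
  | zero =>
      unfold calculate_fine
      rw [PySem.List.pyRange_one_eq_nil (by norm_num)]
      simp [alt_eq_ediv]
  | succ k ih =>
      unfold calculate_fine at ih ⊢
      push_cast
      rw [show ((k : Int) + 1 + 1) = ((k : Int) + 1) + 1 by ring,
          PySem.List.pyRange_one_succ_right (by omega),
          List.foldl_append]
      simp only [List.foldl_cons, List.foldl_nil]
      rw [ih, alt_eq_ediv, alt_eq_ediv]
      by_cases h : (k : Int) + 1 ≤ 3
      · rw [if_pos h]
        have h1 : max ((k : Int) + 1 - 3) 0 = 0 := by omega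
        have h2 : max ((k : Int) - 3) 0 = 0 := by omega
        rw [h1, h2]; ring
      · rw [if_neg h, PySem.Int.floordiv_eq_ediv_of_pos (show (0:Int) < 3 by norm_num)]
        have h1 : max ((k : Int) + 1 - 3) 0 = ((k : Int) - 3) + 1 := by omega
        have h2 : max ((k : Int) - 3) 0 = (k : Int) - 3 := by omega
        have h3 : (k : Int) + 1 - 4 = (k : Int) - 3 := by ring
        rw [h1, h2, h3]
        exact (closed_form_step ((k : Int) - 3)).symm

-- ===== VERDICT (by name: the statement is the Claim_ definition above) =====
theorem calculate_fine_spec : Claim_equal_calculate_fine := by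
  intro n _
  unfold Spec_calculate_fine
  by_cases h : n ≤ 0
  · unfold calculate_fine
    rw [PySem.List.pyRange_one_eq_nil (by omega), alt_eq_ediv]
    have h1 : max (n - 3) 0 = 0 := by omega
    rw [h1]; norm_num
  · have e : n = ((n.toNat : Nat) : Int) := by omega
    rw [e]
    exact fine_nat n.toNat
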